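-- pv_equiv track=rewrite | github.com/ReneCoHo/adventofcode | 2021/10/syntax.py | completeLineValue
-- ===== SOURCE A (Python) =====
-- def completeValue(c):
--     switcher = {
--         '(' : 1,
--         '[' : 2,
--         '{' : 3,
--         '<' : 4
--     }
--     return switcher.get(c, 0)
--
-- def completeLineValue(open_stack):
--     if not open_stack:
--         return 0
--
--     prod = 0
--     for c in reversed(open_stack):
--         prod *= 5
--         prod += completeValue(c)
--
--     return prod
-- ===== SOURCE B (Python) =====
-- def completeValue(c):
--     switcher = {
--         '(' : 1,
--         '[' : 2,
--         '{' : 3,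
--         '<' : 4
--     }
--     return switcher.get(c, 0)
--
-- def completeLineValue(open_stack):
--     total = 0
--     weight = 1
--     for c in open_stack:
--         total += completeValue(c) * weight
--         weight *= 5
--     return total
-- ===== Notes on version B (the rewrite author's own statement) =====
-- stated objective: alternative
-- what changed: Forward place-value summation maintaining an explicit weight (power of 5) per position, instead of A's reversed-traversal Horner accumulation that rescales the running total; the empty-list early return disappears.
import Mathlib
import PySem

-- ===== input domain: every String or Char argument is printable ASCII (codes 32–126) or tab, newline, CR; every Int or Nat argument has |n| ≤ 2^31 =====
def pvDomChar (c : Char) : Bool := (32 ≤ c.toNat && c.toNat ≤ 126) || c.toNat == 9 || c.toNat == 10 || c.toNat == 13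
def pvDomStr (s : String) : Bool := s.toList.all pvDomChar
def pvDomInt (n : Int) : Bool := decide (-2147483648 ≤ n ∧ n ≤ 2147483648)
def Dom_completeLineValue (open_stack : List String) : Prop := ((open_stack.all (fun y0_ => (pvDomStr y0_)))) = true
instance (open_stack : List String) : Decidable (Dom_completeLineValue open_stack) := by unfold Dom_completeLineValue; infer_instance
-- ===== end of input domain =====

-- B replaces A's reversed-traversal Horner accumulation with a forward pass
-- maintaining an explicit positional weight (power of 5); alternative decomposition, same cost.


-- ===== PORT A =====
-- completeValue: the dict lookup with default 0 (shared helper; identical in Source A and Source B)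
def completeValue (c : String) : Int :=
  (PySem.Dict.ofList [("(", (1 : Int)), ("[", 2), ("{", 3), ("<", 4)]).getD c 0

def completeLineValue (open_stack : List String) : Int :=
  if open_stack = [] then 0
  else open_stack.reverse.foldl (fun prod c => prod * 5 + completeValue c) 0

-- ===== PORT B =====
def completeLineValue_alt (open_stack : List String) : Int :=
  (open_stack.foldl (fun (st : Int × Int) c => (st.1 + completeValue c * st.2, st.2 * 5)) (0, 1)).1

-- ===== PRECONDITION & SPEC =====
def Spec_completeLineValue (open_stack : List String) (out : Int) : Prop := out = completeLineValue_alt open_stack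
instance (open_stack : List String) (out : Int) : Decidable (Spec_completeLineValue open_stack out) := by unfold Spec_completeLineValue; infer_instance

-- ===== CLAIM (what is proved, stated in full; the proofs are below) =====
def Claim_equal_completeLineValue : Prop := ∀ (open_stack : List String), Dom_completeLineValue open_stack → Spec_completeLineValue open_stack (completeLineValue open_stack)

-- ===== LEMMAS AND PROOFS =====

-- Horner value of the reversed list, as A's loop computes from accumulator p
def pvHorner (l : List String) : Int :=
  l.reverse.foldl (fun prod c => prod * 5 + completeValue c) 0

theorem pvHorner_cons (c : String) (l : List String) :
    pvHorner (c :: l) = pvHorner l * 5 + completeValue c := by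
  unfold pvHorner
  simp [List.foldl_append]

-- B's loop invariant: from state (t, w) the first component ends at t + w * Horner
theorem pvAlt_invariant (l : List String) (t w : Int) :
    (l.foldl (fun (st : Int × Int) c => (st.1 + completeValue c * st.2, st.2 * 5)) (t, w)).1
      = t + w * pvHorner l := by
  induction l generalizing t w with
  | nil => simp [pvHorner]
  | cons c l ih =>
    simp only [List.foldl_cons, ih, pvHorner_cons]
    ring

-- ===== VERDICT (by name: the statement is the Claim_ definition above) =====
theorem completeLineValue_spec : Claim_equal_completeLineValue := by
  intro open_stack _
  unfold Spec_completeLineValue completeLineValue completeLineValue_alt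
  rw [pvAlt_invariant]
  cases open_stack with
  | nil => simp [pvHorner]
  | cons c l => simp [pvHorner]
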